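-- pv_equiv track=rewrite | github.com/TJZine/frame-compare-legacy | src/frame_compare/layout/engine.py | prepare_condition
-- ===== SOURCE A (Python) =====
-- _SAFE_FUNCTION_TOKENS = {"abs", "min", "max"}
--
-- def prepare_condition(expr: str) -> str:
--     """
--     Convert a layout condition expression into a Python-evaluable expression that resolves symbols at runtime.
--
--     The input expression may use C-style logical operators and unqualified identifiers; this function:
--     - replaces `&&`/`||` with `and`/`or`,
--     - normalizes boolean and null-like literals (`true`/`false`/`none`) to `True`/`False`/`None`,
--     - replaces identifiers (e.g., `foo.bar`) with calls to `resolve('foo.bar')`,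
--     - converts unary `!` to Python `not` while preserving `!=`.
--
--     Parameters:
--         expr (str): A condition expression from the layout template.
--
--     Returns:
--         str: A Python expression string suitable for evaluation in the restricted namespace.
--     """
--     cleaned = expr.replace("&&", " and ").replace("||", " or ")
--     tokens: list[str] = []
--     index = 0
--     while index < len(cleaned):
--         char = cleaned[index]
--         if char.isalpha() or char == "_":
--             start = index
--             while index < len(cleaned) and (
--                 cleaned[index].isalnum() or cleaned[index] in {"_", "."}
--             ):
--                 index += 1
--             token = cleaned[start:index]
--             lowered = token.lower()
--             if token in {"and", "or", "not", "True", "False", "None"}: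
--                 tokens.append(token)
--             elif lowered == "true":
--                 tokens.append("True")
--             elif lowered == "false":
--                 tokens.append("False")
--             elif lowered == "none":
--                 tokens.append("None")
--             elif lowered in _SAFE_FUNCTION_TOKENS:
--                 tokens.append(token)
--             else:
--                 tokens.append(f"resolve('{token}')")
--             continue
--         if char == "!":
--             if index + 1 < len(cleaned) and cleaned[index + 1] == "=":
--                 tokens.append("!=")
--                 index += 2
--                 continue
--             tokens.append("not ")
--             index += 1
--             continue
--         tokens.append(char)
--         index += 1
--     return "".join(tokens)
-- ===== SOURCE B (Python) =====
-- from itertools import groupby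
--
-- _SAFE_FUNCTION_TOKENS = {"abs", "min", "max"}
-- _PYTHON_TOKENS = {"and", "or", "not", "True", "False", "None"}
--
--
-- def _render_identifier(token: str) -> str:
--     if token in _PYTHON_TOKENS:
--         return token
--     lowered = token.lower()
--     if lowered == "true":
--         return "True"
--     if lowered == "false":
--         return "False"
--     if lowered == "none":
--         return "None"
--     if lowered in _SAFE_FUNCTION_TOKENS:
--         return token
--     return f"resolve('{token}')"
--
--
-- def _is_word(char: str) -> bool:
--     return char.isalnum() or char in "_."
--
--
-- def _render_run(run: str) -> str:
--     if not _is_word(run[0]):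
--         return run
--     i = 0
--     while i < len(run) and not (run[i].isalpha() or run[i] == "_"):
--         i += 1
--     head = run[:i]
--     return head if i == len(run) else head + _render_identifier(run[i:])
--
--
-- def prepare_condition(expr: str) -> str:
--     cleaned = expr.replace("&&", " and ").replace("||", " or ")
--     substituted = "".join(
--         _render_run("".join(group)) for _, group in groupby(cleaned, key=_is_word)
--     )
--     return "".join(
--         "not " if char == "!" and substituted[i + 1 : i + 2] != "=" else char
--         for i, char in enumerate(substituted)
--     )
-- ===== Notes on version B (the rewrite author's own statement) =====
-- stated objective: alternative
-- what changed: A's single index-based scanner with an inner while loop and exclamation-mark lookahead is replaced by a three-pass pipeline: operator cleanup, identifier substitution over maximal word-class runs (itertools.groupby), then a stateless per-character local rule that rewrites a lone exclamation mark into the Python negation keyword.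
import Mathlib
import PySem

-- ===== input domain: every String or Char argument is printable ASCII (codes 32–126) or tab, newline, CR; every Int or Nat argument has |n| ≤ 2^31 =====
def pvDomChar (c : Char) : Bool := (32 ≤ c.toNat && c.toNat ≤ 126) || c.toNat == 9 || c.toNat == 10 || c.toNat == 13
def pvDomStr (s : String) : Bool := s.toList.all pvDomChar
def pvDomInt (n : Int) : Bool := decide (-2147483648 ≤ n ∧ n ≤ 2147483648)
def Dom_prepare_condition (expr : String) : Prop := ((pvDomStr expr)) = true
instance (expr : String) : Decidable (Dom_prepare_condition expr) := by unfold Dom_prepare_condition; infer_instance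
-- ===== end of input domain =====

-- B replaces A's index-based scanner by a three-pass pipeline (operator cleanup, identifier
-- substitution over maximal character-class runs, then a stateless local rule for '!');
-- objective: alternative structure, same cost.

-- ===== PORT A =====

-- A's identifier-continuation test: cleaned[index].isalnum() or cleaned[index] in {"_", "."}
def pcWordChar (c : Char) : Bool := PySem.Chars.isalnum c || c == '_' || c == '.'

-- A's identifier-start test: char.isalpha() or char == "_"
def pcStartChar (c : Char) : Bool := PySem.Chars.isalpha c || c == '_'

-- the token-classification branch chain (identical code in A's loop body and B's _render_identifier)
def pcRenderIdent (token : List Char) : List Char :=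
  if token = "and".toList ∨ token = "or".toList ∨ token = "not".toList ∨
     token = "True".toList ∨ token = "False".toList ∨ token = "None".toList then token
  else if PySem.Chars.lower token = "true".toList then "True".toList
  else if PySem.Chars.lower token = "false".toList then "False".toList
  else if PySem.Chars.lower token = "none".toList then "None".toList
  else if PySem.Chars.lower token = "abs".toList ∨ PySem.Chars.lower token = "min".toList ∨
          PySem.Chars.lower token = "max".toList then token
  else "resolve('".toList ++ token ++ "')".toList

-- A's while loop: index advances by consuming the list; the inner while is takeWhile/dropWhile
def pcLoopA (l : List Char) : List (List Char) :=
  match l with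
  | [] => []
  | c :: rest =>
    if pcStartChar c then
      pcRenderIdent ((c :: rest).takeWhile pcWordChar) :: pcLoopA ((c :: rest).dropWhile pcWordChar)
    else if c == '!' then
      -- Python: if index + 1 < len(cleaned) and cleaned[index + 1] == "=": … index += 2
      if rest.head? == some '=' then "!=".toList :: pcLoopA rest.tail
      else "not ".toList :: pcLoopA rest
    else [c] :: pcLoopA rest
termination_by l.length
decreasing_by
  all_goals simp only [List.length_cons]
  · have hw : pcWordChar c = true := by
      rcases Bool.or_eq_true _ _ |>.mp (by assumption : pcStartChar c = true) with h | h
      · simp [pcWordChar, PySem.Chars.isalnum, h]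
      · simp [pcWordChar, h]
    simp only [List.dropWhile, hw]
    exact Nat.lt_succ_of_le (List.length_dropWhile_le _ _)
  all_goals simp [List.length_tail]

def prepare_condition (expr : String) : String :=
  let cleaned := PySem.Chars.replace
    (PySem.Chars.replace expr.toList "&&".toList " and ".toList) "||".toList " or ".toList
  String.ofList (PySem.Chars.join [] (pcLoopA cleaned))

-- ===== PORT B =====

-- itertools.groupby(cleaned, key=_is_word): maximal runs of equal word-class
def pcGroupRuns (l : List Char) : List (List Char) :=
  match l with
  | [] => []
  | c :: rest =>
    (c :: rest.takeWhile (fun d => pcWordChar d == pcWordChar c)) ::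
      pcGroupRuns (rest.dropWhile (fun d => pcWordChar d == pcWordChar c))
termination_by l.length
decreasing_by
  exact Nat.lt_succ_of_le (List.length_dropWhile_le _ _)

-- _render_run: non-word runs pass through; word runs are split into a non-start prefix and one identifier
def pcRenderRun (run : List Char) : List Char :=
  match run with
  | [] => []
  | c :: _ =>
    if pcWordChar c then
      if run.dropWhile (fun d => !pcStartChar d) = [] then run.takeWhile (fun d => !pcStartChar d)
      else run.takeWhile (fun d => !pcStartChar d) ++ pcRenderIdent (run.dropWhile (fun d => !pcStartChar d))
    else run

-- the final comprehension: "not " if char == "!" and substituted[i+1:i+2] != "=" else char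
def pcBangMap (l : List Char) : List Char :=
  match l with
  | [] => []
  | c :: rest =>
    (if c == '!' && rest.head? != some '=' then "not ".toList else [c]) ++ pcBangMap rest

def prepare_condition_alt (expr : String) : String :=
  let cleaned := PySem.Chars.replace
    (PySem.Chars.replace expr.toList "&&".toList " and ".toList) "||".toList " or ".toList
  String.ofList (pcBangMap ((pcGroupRuns cleaned).flatMap pcRenderRun))

-- ===== PRECONDITION & SPEC =====
def Spec_prepare_condition (expr : String) (out : String) : Prop := out = prepare_condition_alt expr
instance (expr : String) (out : String) : Decidable (Spec_prepare_condition expr out) := by unfold Spec_prepare_condition; infer_instance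

-- ===== CLAIM (what is proved, stated in full; the proofs are below) =====
def Claim_equal_prepare_condition : Prop := ∀ (expr : String), Dom_prepare_condition expr → Spec_prepare_condition expr (prepare_condition expr)

-- ===== LEMMAS AND PROOFS =====

-- an identifier-start char is a word (continuation) char
theorem pcStart_word {c : Char} (h : pcStartChar c = true) : pcWordChar c = true := by
  rcases Bool.or_eq_true _ _ |>.mp h with h' | h'
  · simp [pcWordChar, PySem.Chars.isalnum, h']
  · simp [pcWordChar, h']

theorem pcWord_ne_bang {c : Char} (h : pcWordChar c = true) : c ≠ '!' := by
  rintro rfl; simp [pcWordChar, PySem.Chars.isalnum, PySem.Chars.isalpha,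
    PySem.Chars.isupper, PySem.Chars.islower, PySem.Chars.isdigit] at h

theorem pcWord_ne_eq {c : Char} (h : pcWordChar c = true) : c ≠ '=' := by
  rintro rfl; simp [pcWordChar, PySem.Chars.isalnum, PySem.Chars.isalpha,
    PySem.Chars.isupper, PySem.Chars.islower, PySem.Chars.isdigit] at h

-- pcBangMap distributes over an append when no lookahead crosses the seam
theorem pcBangMap_append {x y : List Char} (h : y.head? ≠ some '=') :
    pcBangMap (x ++ y) = pcBangMap x ++ pcBangMap y := by
  induction x with
  | nil => simp [pcBangMap]
  | cons c r ih =>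
    have hhead : (r ++ y).head? = some '=' ↔ r.head? = some '=' := by
      cases r with
      | nil => simp; intro h'; exact h (by simp [h'])
      | cons d r' => simp
    simp only [List.cons_append, pcBangMap, ih]
    by_cases hc : c = '!'
    · by_cases he : r.head? = some '='
      · simp [hc, he, hhead.mpr he]
      · have h2 : ¬ (r ++ y).head? = some '=' := fun h' => he (hhead.mp h')
        simp only [hc, beq_self_eq_true, Bool.true_and]
        rw [if_pos (by simpa using h2), if_pos (by simpa using he)]
        simp
    · simp [hc]

-- pcBangMap is the identity on '!'-free prefixes
theorem pcBangMap_no_bang {x y : List Char} (h : '!' ∉ x) :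
    pcBangMap (x ++ y) = x ++ pcBangMap y := by
  induction x with
  | nil => simp
  | cons c r ih =>
    have hc : ¬ (c == '!') = true := by
      simp only [beq_iff_eq]; intro h'; exact h (h' ▸ List.mem_cons_self)
    simp only [List.cons_append, pcBangMap, hc, Bool.false_and]
    simp [ih (fun hm => h (List.mem_cons_of_mem _ hm))]

theorem pcRenderIdent_ne_nil {tok : List Char} (h : tok ≠ []) : pcRenderIdent tok ≠ [] := by
  unfold pcRenderIdent
  split_ifs <;> simp_all

-- the rendered identifier of a word token contains no '!'
theorem pcRenderIdent_no_bang {tok : List Char} (h : ∀ d ∈ tok, pcWordChar d = true) :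
    '!' ∉ pcRenderIdent tok := by
  have htok : '!' ∉ tok := fun hm => pcWord_ne_bang (h _ hm) rfl
  unfold pcRenderIdent
  split_ifs
  · exact htok
  · decide
  · decide
  · decide
  · exact htok
  · intro hm
    rcases List.mem_append.mp hm with hm | hm
    · rcases List.mem_append.mp hm with hm | hm
      · revert hm; decide
      · exact htok hm
    · revert hm; decide

-- the first char of a rendered identifier of a start-headed token is not '='
theorem pcRenderIdent_head {d : Char} {r : List Char} (h : pcStartChar d = true) :
    (pcRenderIdent (d :: r)).head? ≠ some '=' := by
  have hd : d ≠ '=' := pcWord_ne_eq (pcStart_word h)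
  unfold pcRenderIdent
  split_ifs <;> simp_all

-- the word-run case of pcRenderRun, written out
def pcRenderRunW (run : List Char) : List Char :=
  if run.dropWhile (fun d => !pcStartChar d) = [] then run.takeWhile (fun d => !pcStartChar d)
  else run.takeWhile (fun d => !pcStartChar d) ++ pcRenderIdent (run.dropWhile (fun d => !pcStartChar d))

theorem pcRenderRun_word {run : List Char} (h : ∀ d ∈ run, pcWordChar d = true) :
    pcRenderRun run = pcRenderRunW run := by
  cases run with
  | nil => simp [pcRenderRun, pcRenderRunW]
  | cons c r => simp [pcRenderRun, pcRenderRunW, h c List.mem_cons_self]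

theorem pcRenderRunW_no_bang {run : List Char} (h : ∀ d ∈ run, pcWordChar d = true) :
    '!' ∉ pcRenderRunW run := by
  have h1 : '!' ∉ run.takeWhile (fun d => !pcStartChar d) := fun hm =>
    pcWord_ne_bang (h _ (List.IsPrefix.mem hm (List.takeWhile_prefix _))) rfl
  have h2 : '!' ∉ pcRenderIdent (run.dropWhile (fun d => !pcStartChar d)) :=
    pcRenderIdent_no_bang (fun d hm => h _ (List.IsSuffix.mem hm (List.dropWhile_suffix _)))
  unfold pcRenderRunW
  split_ifs <;> simp_all

-- the rendered run of a nonempty word run is nonempty and does not start with '='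
theorem pcRenderRun_word_head {d : Char} {r : List Char}
    (h : ∀ e ∈ d :: r, pcWordChar e = true) :
    (pcRenderRun (d :: r)).head? ≠ some '=' ∧ pcRenderRun (d :: r) ≠ [] := by
  have hd : pcWordChar d = true := h d List.mem_cons_self
  rw [pcRenderRun_word h]
  unfold pcRenderRunW
  by_cases hs : pcStartChar d = true
  · have ht : (d :: r).takeWhile (fun d => !pcStartChar d) = [] := by
      simp [hs]
    have hdr : (d :: r).dropWhile (fun d => !pcStartChar d) = d :: r := by
      simp [hs]
    rw [ht, hdr, if_neg (by simp)]
    exact ⟨by simpa using pcRenderIdent_head hs, by simpa using pcRenderIdent_ne_nil (by simp)⟩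
  · have ht : (d :: r).takeWhile (fun d => !pcStartChar d)
        = d :: r.takeWhile (fun d => !pcStartChar d) := by
      simp [hs]
    rw [ht]
    split_ifs <;> simp_all [pcWord_ne_eq hd]

-- one unfolding step of A's scanner
theorem pcLoopA_cons (c : Char) (rest : List Char) :
    pcLoopA (c :: rest) =
      if pcStartChar c then
        pcRenderIdent ((c :: rest).takeWhile pcWordChar)
          :: pcLoopA ((c :: rest).dropWhile pcWordChar)
      else if c == '!' then
        if rest.head? == some '=' then "!=".toList :: pcLoopA rest.tail
        else "not ".toList :: pcLoopA rest
      else [c] :: pcLoopA rest := by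
  conv_lhs => rw [pcLoopA.eq_def]

-- A's scanner across a word run followed by a non-word (or empty) remainder
theorem pcLoopA_word_run (run t : List Char) (hw : ∀ d ∈ run, pcWordChar d = true)
    (ht : ∀ d, t.head? = some d → pcWordChar d = false) :
    (pcLoopA (run ++ t)).flatten = pcRenderRunW run ++ (pcLoopA t).flatten := by
  induction run with
  | nil => simp [pcRenderRunW]
  | cons c r ih =>
    have hc : pcWordChar c = true := hw c List.mem_cons_self
    have hwr : ∀ d ∈ r, pcWordChar d = true := fun d hm => hw d (List.mem_cons_of_mem _ hm)
    have htake : ((c :: r) ++ t).takeWhile pcWordChar = c :: r := by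
      have h1 : (c :: r).takeWhile pcWordChar = c :: r :=
        List.takeWhile_eq_self_iff.mpr hw
      have h2 : t.takeWhile pcWordChar = [] := by
        cases t with
        | nil => rfl
        | cons d t' => simp [ht d rfl]
      rw [List.takeWhile_append, h1]
      simp [h2]
    have hdrop : ((c :: r) ++ t).dropWhile pcWordChar = t := by
      have h1 : (c :: r).dropWhile pcWordChar = [] := List.dropWhile_eq_nil_iff.mpr
        (fun d hm => hw d hm)
      cases t with
      | nil => simpa using h1
      | cons d t' =>
        rw [List.dropWhile_append]
        simp [h1, ht d rfl]
    by_cases hs : pcStartChar c = true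
    · rw [List.cons_append, pcLoopA_cons, if_pos hs, ← List.cons_append, htake, hdrop]
      unfold pcRenderRunW
      have ht' : (c :: r).takeWhile (fun d => !pcStartChar d) = [] := by
        simp [hs]
      have hd' : (c :: r).dropWhile (fun d => !pcStartChar d) = c :: r := by
        simp [hs]
      rw [ht', hd', if_neg (by simp)]
      simp
    · have hbang : ¬ (c == '!') = true := by
        simp only [beq_iff_eq]; exact pcWord_ne_bang hc
      rw [List.cons_append, pcLoopA_cons, if_neg hs, if_neg hbang]
      simp only [List.flatten_cons, ih hwr]
      unfold pcRenderRunW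
      have ht' : (c :: r).takeWhile (fun d => !pcStartChar d)
          = c :: r.takeWhile (fun d => !pcStartChar d) := by
        simp [hs]
      have hd' : (c :: r).dropWhile (fun d => !pcStartChar d)
          = r.dropWhile (fun d => !pcStartChar d) := by
        simp [hs]
      rw [ht', hd']
      split_ifs <;> simp

-- A's scanner across a non-word run followed by a remainder not starting with '='
theorem pcLoopA_nonword_run (run t : List Char) (hw : ∀ d ∈ run, pcWordChar d = false)
    (ht : t.head? ≠ some '=') :
    (pcLoopA (run ++ t)).flatten = pcBangMap run ++ (pcLoopA t).flatten := by
  induction run with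
  | nil => simp [pcBangMap]
  | cons c r ih =>
    have hc : pcWordChar c = false := hw c List.mem_cons_self
    have hwr : ∀ d ∈ r, pcWordChar d = false := fun d hm => hw d (List.mem_cons_of_mem _ hm)
    have hs : ¬ pcStartChar c = true := fun h => by rw [pcStart_word h] at hc; cases hc
    have ihr := ih hwr
    by_cases hb : c = '!'
    · subst hb
      cases r with
      | nil =>
        have htne : ¬ (t.head? == some '=') = true := by simpa using ht
        rw [show ['!'] ++ t = '!' :: t from rfl, pcLoopA_cons,
          if_neg hs, if_pos (by decide), if_neg htne]
        simp [pcBangMap]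
      | cons d r' =>
        by_cases hd : d = '='
        · subst hd
          -- A consumes "!=": extract the claim for r' from the claim for '=' :: r'
          have key : (pcLoopA (r' ++ t)).flatten = pcBangMap r' ++ (pcLoopA t).flatten := by
            have h2 := ihr
            have hse : ¬ pcStartChar '=' = true := fun h => by
              have h3 := pcStart_word h
              rw [hwr '=' List.mem_cons_self] at h3; cases h3
            rw [List.cons_append, pcLoopA_cons, if_neg hse, if_neg (by decide)] at h2
            simp only [List.flatten_cons] at h2
            rw [show pcBangMap ('=' :: r') = '=' :: pcBangMap r' by simp [pcBangMap]] at h2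
            simpa using h2
          rw [List.cons_append, pcLoopA_cons, if_neg hs, if_pos (by decide)]
          simp only [List.cons_append, List.head?_cons, List.tail_cons,
            beq_self_eq_true, if_pos, List.flatten_cons]
          rw [show pcBangMap ('!' :: '=' :: r') = '!' :: '=' :: pcBangMap r' by
            simp [pcBangMap]]
          simp [key, show ("!=".toList : List Char) = ['!', '='] by decide]
        · rw [List.cons_append, pcLoopA_cons, if_neg hs, if_pos (by decide),
            if_neg (by simp [hd])]
          simp only [List.flatten_cons]
          rw [show pcBangMap ('!' :: d :: r') = "not ".toList ++ pcBangMap (d :: r') by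
            simp [pcBangMap, hd]]
          rw [ihr]
          simp
    · have hbne : ¬ (c == '!') = true := by simpa using hb
      rw [List.cons_append, pcLoopA_cons, if_neg hs, if_neg hbne]
      simp only [List.flatten_cons, ihr]
      rw [show pcBangMap (c :: r) = [c] ++ pcBangMap r by simp [pcBangMap, hb]]
      simp

-- "".join is flatten
theorem pcJoin_nil (xs : List (List Char)) : PySem.Chars.join [] xs = xs.flatten := by
  induction xs with
  | nil => rfl
  | cons x t ih =>
    cases t with
    | nil => simp [PySem.Chars.join, List.intercalate]
    | cons y t' =>
      simp only [PySem.Chars.join, List.intercalate] at *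
      simp_all [List.intersperse]

-- the main induction: A's scanner equals B's run pipeline, run by run
theorem pcMain (l : List Char) :
    (pcLoopA l).flatten = pcBangMap ((pcGroupRuns l).flatMap pcRenderRun) := by
  induction hn : l.length using Nat.strong_induction_on generalizing l with
  | _ n ih =>
  cases l with
  | nil => simp [pcLoopA, pcGroupRuns, pcBangMap]
  | cons c rest =>
    subst hn
    have ihrest : ∀ (m : List Char), m.length ≤ rest.length →
        (pcLoopA m).flatten = pcBangMap ((pcGroupRuns m).flatMap pcRenderRun) := by
      intro m hm
      exact ih m.length (by simp only [List.length_cons]; omega) m rfl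
    have hrun : ∀ d ∈ rest.takeWhile (fun d => pcWordChar d == pcWordChar c),
        pcWordChar d = pcWordChar c := by
      intro d hm
      simpa using List.mem_takeWhile_imp hm
    have hdrop : ∀ d, (rest.dropWhile (fun d => pcWordChar d == pcWordChar c)).head? = some d →
        pcWordChar d ≠ pcWordChar c := by
      intro d hd hcontra
      have h0 := List.head?_dropWhile_not (fun d => pcWordChar d == pcWordChar c) rest
      rw [hd] at h0
      simp only [beq_eq_false_iff_ne, ne_eq] at h0
      exact h0 hcontra
    have hsplit : c :: rest
        = (c :: rest.takeWhile (fun d => pcWordChar d == pcWordChar c))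
          ++ rest.dropWhile (fun d => pcWordChar d == pcWordChar c) := by
      simp [List.takeWhile_append_dropWhile]
    have hgroup : pcGroupRuns (c :: rest)
        = (c :: rest.takeWhile (fun d => pcWordChar d == pcWordChar c))
          :: pcGroupRuns (rest.dropWhile (fun d => pcWordChar d == pcWordChar c)) := by
      rw [pcGroupRuns]
    have hlen : (rest.dropWhile (fun d => pcWordChar d == pcWordChar c)).length ≤ rest.length :=
      List.length_dropWhile_le _ _
    by_cases hc : pcWordChar c = true
    · -- word run
      have hallw : ∀ d ∈ c :: rest.takeWhile (fun d => pcWordChar d == pcWordChar c),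
          pcWordChar d = true := by
        intro d hm
        rcases List.mem_cons.mp hm with rfl | hm
        · exact hc
        · rw [hrun d hm]; exact hc
      have hthead : ∀ d, (rest.dropWhile (fun d => pcWordChar d == pcWordChar c)).head? = some d →
          pcWordChar d = false := by
        intro d hd
        have h0 := hdrop d hd
        rw [hc] at h0
        cases h1 : pcWordChar d
        · rfl
        · exact absurd h1 h0
      rw [hgroup, List.flatMap_cons,
        pcBangMap_no_bang (pcRenderRunW_no_bang hallw ∘ (pcRenderRun_word hallw ▸ id)),
        pcRenderRun_word hallw]
      rw [hsplit, pcLoopA_word_run _ _ hallw hthead, ihrest _ hlen]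
    · -- non-word run
      have hcf : pcWordChar c = false := by
        cases h1 : pcWordChar c
        · rfl
        · exact absurd h1 hc
      have hallnw : ∀ d ∈ c :: rest.takeWhile (fun d => pcWordChar d == pcWordChar c),
          pcWordChar d = false := by
        intro d hm
        rcases List.mem_cons.mp hm with rfl | hm
        · exact hcf
        · rw [hrun d hm]; exact hcf
      have hthead : (rest.dropWhile (fun d => pcWordChar d == pcWordChar c)).head? ≠ some '=' := by
        intro h0
        exact hdrop '=' h0 (by rw [hcf]; decide)
      have hbhead :
          ((pcGroupRuns (rest.dropWhile (fun d => pcWordChar d == pcWordChar c))).flatMap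
            pcRenderRun).head? ≠ some '=' := by
        cases hrest : rest.dropWhile (fun d => pcWordChar d == pcWordChar c) with
        | nil => simp [pcGroupRuns]
        | cons d r2 =>
          have hdw : pcWordChar d = true := by
            have h0 := hdrop d (by rw [hrest]; rfl)
            rw [hcf] at h0
            cases h1 : pcWordChar d
            · exact absurd h1 h0
            · rfl
          have hall2 : ∀ e ∈ d :: r2.takeWhile (fun e => pcWordChar e == pcWordChar d),
              pcWordChar e = true := by
            intro e hm
            rcases List.mem_cons.mp hm with rfl | hm
            · exact hdw
            · have := List.mem_takeWhile_imp hm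
              simp only [beq_iff_eq] at this
              rw [this]; exact hdw
          obtain ⟨hh, hne⟩ := pcRenderRun_word_head hall2
          rw [pcGroupRuns, List.flatMap_cons]
          cases hrr : pcRenderRun (d :: r2.takeWhile (fun e => pcWordChar e == pcWordChar d)) with
          | nil => exact absurd hrr hne
          | cons e es =>
            rw [hrr] at hh
            simpa using hh
      have hrr0 : pcRenderRun (c :: rest.takeWhile (fun d => pcWordChar d == pcWordChar c))
          = c :: rest.takeWhile (fun d => pcWordChar d == pcWordChar c) := by
        simp [pcRenderRun, hcf]
      rw [hgroup, List.flatMap_cons, hrr0, pcBangMap_append hbhead]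
      rw [hsplit, pcLoopA_nonword_run _ _ hallnw hthead, ihrest _ hlen]

-- ===== VERDICT (by name: the statement is the Claim_ definition above) =====
theorem prepare_condition_spec : Claim_equal_prepare_condition := by
  intro expr _
  unfold Spec_prepare_condition prepare_condition prepare_condition_alt
  simp [pcJoin_nil, pcMain]
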